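-- pv_equiv track=rewrite | github.com/samhippie/shallow-red | modelInput.py | _denumAction
-- ===== SOURCE A (Python) =====
-- def _denumAction(n):
--     actionType = n % 10
--     n = n // 10
--     #team
--     if actionType == 9:
--         #can pick 1-6 mons
--         numPicked = (n % 6) + 1
--         n = n // 6
--         team = ['0' for _ in range(6)]
--         for i in range(6, 0, -1):
--             spot = n % i
--             n = n // i
--             #find the index of the spotth 0
--             for j in range(6):
--                 if team[j] == '0':
--                     spot -= 1
--                 if spot < 0:
--                     team[j] = str(6 - i + 1)
--                     break
--         team = team[0:numPicked]
--         return ' team ' + ''.join(team)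
--
--     actionType1 = actionType % 3
--     actionType2 = actionType // 3
--
--     actions = []
--     for at in [actionType1, actionType2]:
--         #move
--         if at == 0:
--             action = n % 16
--             n = n // 16
--             move = (action % 4) + 1
--             target = (action // 4) - 2
--             #0 isn't a valid target
--             if target >= 0:
--                 target += 1
--             actions.append('move ' + str(move) + ' ' + str(target))
--         #switch
--         elif at == 1:
--             target = (n % 6) + 1
--             n = n // 6
--             actions.append('switch ' + str(target))
--         #pass
--         elif at == 2:
--             actions.append('pass')
--
--     return ' ' + ','.join(actions)
-- ===== SOURCE B (Python) =====
-- def _decodeAction(at, n):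
--     if at == 0:
--         n, action = divmod(n, 16)
--         move = action % 4 + 1
--         target = action // 4 - 2
--         if target >= 0:
--             target += 1
--         return 'move ' + str(move) + ' ' + str(target), n
--     if at == 1:
--         n, target = divmod(n, 6)
--         return 'switch ' + str(target + 1), n
--     return 'pass', n
--
-- def _denumAction(n):
--     actionType = n % 10
--     n //= 10
--     if actionType == 9:
--         numPicked = n % 6 + 1
--         n //= 6
--         team = ['0'] * 6
--         free = [0, 1, 2, 3, 4, 5]
--         for i in range(6, 0, -1):
--             n, spot = divmod(n, i)
--             team[free.pop(spot)] = str(7 - i)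
--         return ' team ' + ''.join(team[:numPicked])
--     s1, n = _decodeAction(actionType % 3, n)
--     s2, n = _decodeAction(actionType // 3, n)
--     return ' ' + s1 + ',' + s2
-- ===== Notes on version B (the rewrite author's own statement) =====
-- stated objective: simpler
-- what changed: The team branch maintains an explicit shrinking pool of free positions and pops the spot-th one directly (no inner marker-scanning loop over the team array), and the two-action branch is decomposed into a single-action decoder helper called twice instead of an append-into-list loop with a join.
import Mathlib
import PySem

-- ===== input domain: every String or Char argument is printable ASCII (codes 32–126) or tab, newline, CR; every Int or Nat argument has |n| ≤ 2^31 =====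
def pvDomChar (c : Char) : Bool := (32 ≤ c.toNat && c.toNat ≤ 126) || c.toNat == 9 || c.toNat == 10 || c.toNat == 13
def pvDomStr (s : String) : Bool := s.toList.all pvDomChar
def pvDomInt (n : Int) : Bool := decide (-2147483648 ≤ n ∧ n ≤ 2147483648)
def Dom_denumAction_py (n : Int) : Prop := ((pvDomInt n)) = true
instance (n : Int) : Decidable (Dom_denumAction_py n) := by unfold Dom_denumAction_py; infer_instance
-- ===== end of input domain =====

-- B replaces the team branch's marker-array scan by a shrinking pool of free positions popped
-- directly, and decodes the two actions with a helper called twice instead of a loop+join (objective: simpler).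

-- ===== PORT A =====

-- inner j-loop of the team branch: walk the team, decrement spot at each '0', write and break when spot < 0
def scanA : List String → Int → String → List String
  | [], _, _ => []
  | t :: ts, spot, v =>
    let spot' := if t == "0" then spot - 1 else spot
    if spot' < 0 then v :: ts else t :: scanA ts spot' v

def stepA (st : List String × Int) (i : Int) : List String × Int :=
  let spot := PySem.Int.mod st.2 i
  let n := PySem.Int.floordiv st.2 i
  (scanA st.1 spot (PySem.Int.toStr (6 - i + 1)), n)

def stepActA (st : List String × Int) (at_ : Int) : List String × Int :=
  let actions := st.1
  let n := st.2
  if at_ == 0 then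
    let action := PySem.Int.mod n 16
    let n := PySem.Int.floordiv n 16
    let move := PySem.Int.mod action 4 + 1
    let target := PySem.Int.floordiv action 4 - 2
    let target := if target ≥ 0 then target + 1 else target
    (actions ++ ["move " ++ PySem.Int.toStr move ++ " " ++ PySem.Int.toStr target], n)
  else if at_ == 1 then
    let target := PySem.Int.mod n 6 + 1
    let n := PySem.Int.floordiv n 6
    (actions ++ ["switch " ++ PySem.Int.toStr target], n)
  else if at_ == 2 then (actions ++ ["pass"], n)
  else (actions, n)

def denumAction_py (n : Int) : String :=
  let actionType := PySem.Int.mod n 10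
  let n := PySem.Int.floordiv n 10
  if actionType == 9 then
    let numPicked := PySem.Int.mod n 6 + 1
    let n := PySem.Int.floordiv n 6
    let team := (List.range 6).map (fun _ => "0")
    let st := List.foldl stepA (team, n) (PySem.List.pyRange 6 0 (-1))
    " team " ++ PySem.Str.join "" (PySem.List.slice st.1 (some 0) (some numPicked))
  else
    let at1 := PySem.Int.mod actionType 3
    let at2 := PySem.Int.floordiv actionType 3
    let st := List.foldl stepActA ([], n) [at1, at2]
    " " ++ PySem.Str.join "," st.1

-- ===== PORT B =====

def decodeAction (at_ : Int) (n : Int) : String × Int :=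
  if at_ == 0 then
    let n' := PySem.Int.floordiv n 16
    let action := PySem.Int.mod n 16
    let move := PySem.Int.mod action 4 + 1
    let target := PySem.Int.floordiv action 4 - 2
    let target := if target ≥ 0 then target + 1 else target
    ("move " ++ PySem.Int.toStr move ++ " " ++ PySem.Int.toStr target, n')
  else if at_ == 1 then
    ("switch " ++ PySem.Int.toStr (PySem.Int.mod n 6 + 1), PySem.Int.floordiv n 6)
  else ("pass", n)

-- one iteration of B's team loop: pop the spot-th free position, write the label there
-- (the `none` arm is unreachable: spot = n % i < i = free.length throughout)
def stepB (st : (List String × List Int) × Int) (i : Int) : (List String × List Int) × Int :=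
  let n' := PySem.Int.floordiv st.2 i
  let spot := PySem.Int.mod st.2 i
  match PySem.List.pop? st.1.2 spot with
  | some (pos, free') => ((PySem.List.pySetD st.1.1 pos (PySem.Int.toStr (7 - i)), free'), n')
  | none => (st.1, n')

def denumAction_py_alt (n : Int) : String :=
  let actionType := PySem.Int.mod n 10
  let n := PySem.Int.floordiv n 10
  if actionType == 9 then
    let numPicked := PySem.Int.mod n 6 + 1
    let n := PySem.Int.floordiv n 6
    let st := List.foldl stepB ((["0", "0", "0", "0", "0", "0"], [0, 1, 2, 3, 4, 5]), n)
        (PySem.List.pyRange 6 0 (-1))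
    " team " ++ PySem.Str.join "" (PySem.List.slice st.1.1 none (some numPicked))
  else
    let p1 := decodeAction (PySem.Int.mod actionType 3) n
    let p2 := decodeAction (PySem.Int.floordiv actionType 3) p1.2
    " " ++ p1.1 ++ "," ++ p2.1

-- ===== PRECONDITION & SPEC =====
def Spec_denumAction_py (n : Int) (out : String) : Prop := out = denumAction_py_alt n
instance (n : Int) (out : String) : Decidable (Spec_denumAction_py n out) := by unfold Spec_denumAction_py; infer_instance

-- ===== CLAIM (what is proved, stated in full; the proofs are below) =====
def Claim_equal_denumAction_py : Prop := ∀ (n : Int), Dom_denumAction_py n → Spec_denumAction_py n (denumAction_py n)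

-- ===== LEMMAS AND PROOFS =====

-- indices of the '0' (free) slots of a team list, in increasing order
def zeroIdx : List String → List Int
  | [] => []
  | t :: ts => if t == "0" then 0 :: (zeroIdx ts).map (· + 1) else (zeroIdx ts).map (· + 1)

theorem zeroIdx_nonneg : ∀ (team : List String), ∀ x ∈ zeroIdx team, 0 ≤ x := by
  intro team
  induction team with
  | nil => simp [zeroIdx]
  | cons t ts ih =>
    intro x hx
    simp only [zeroIdx] at hx
    split at hx
    · rcases List.mem_cons.mp hx with rfl | hx
      · omega
      · rcases List.mem_map.mp hx with ⟨y, hy, rfl⟩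
        have := ih y hy; omega
    · rcases List.mem_map.mp hx with ⟨y, hy, rfl⟩
      have := ih y hy; omega

theorem pySetD_cons_succ (x : Int) (hx : 0 ≤ x) (t : String) (ts : List String) (v : String) :
    PySem.List.pySetD (t :: ts) (x + 1) v = t :: PySem.List.pySetD ts x v := by
  rw [PySem.List.pySetD_of_nonneg _ _ (by omega : (0:Int) ≤ x + 1), PySem.List.pySetD_of_nonneg _ _ hx]
  have h : (x + 1).toNat = x.toNat + 1 := by omega
  rw [h]
  rfl

theorem getD_map_add_one (zs : List Int) (s : Nat) (h : s < zs.length) :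
    (zs.map (· + 1)).getD s 0 = zs.getD s 0 + 1 := by
  rw [List.getD_eq_getElem _ _ (by simpa using h), List.getD_eq_getElem _ _ h, List.getElem_map]

theorem map_eraseIdx_add_one (zs : List Int) : ∀ s : Nat,
    (zs.map (· + 1)).eraseIdx s = (zs.eraseIdx s).map (· + 1) := by
  induction zs with
  | nil => intro s; simp
  | cons z zs ih =>
    intro s
    cases s with
    | zero => simp
    | succ s => simp [List.eraseIdx_cons_succ, ih s]

def desc : Nat → List Int
  | 0 => []
  | k + 1 => ((k : Int) + 1) :: desc k

-- A's marker scan at spot s writes at exactly the s-th free index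
theorem scanA_eq_set : ∀ (team : List String) (s : Nat) (v : String),
    s < (zeroIdx team).length →
    scanA team (s : Int) v = PySem.List.pySetD team ((zeroIdx team).getD s 0) v := by
  intro team
  induction team with
  | nil => intro s v h; simp [zeroIdx] at h
  | cons t ts ih =>
    intro s v h
    by_cases ht : t = "0"
    · subst ht
      cases s with
      | zero =>
        simp only [scanA, zeroIdx, if_pos (beq_self_eq_true "0"), Nat.cast_zero,
          List.getD_cons_zero]
        rw [if_pos (by norm_num)]
        rw [PySem.List.pySetD_of_nonneg _ _ (by norm_num : (0:Int) ≤ 0)]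
        rfl
      | succ s' =>
        have h' : s' < (zeroIdx ts).length := by
          simp only [zeroIdx, if_pos (beq_self_eq_true "0"), List.length_cons,
            List.length_map] at h
          omega
        have hc : ((s' + 1 : Nat) : Int) - 1 = (s' : Int) := by push_cast; ring
        have hx : 0 ≤ (zeroIdx ts).getD s' 0 := by
          rw [List.getD_eq_getElem _ _ h']
          exact zeroIdx_nonneg ts _ (List.getElem_mem h')
        simp only [scanA, zeroIdx, if_pos (beq_self_eq_true "0")]
        rw [hc, if_neg (by omega), List.getD_cons_succ, getD_map_add_one _ _ h',
          pySetD_cons_succ _ hx, ih s' v h']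
    · have hbe : (t == "0") = false := by simpa using ht
      have h' : s < (zeroIdx ts).length := by
        simp only [zeroIdx, hbe, Bool.false_eq_true, if_false, List.length_map] at h
        exact h
      have hx : 0 ≤ (zeroIdx ts).getD s 0 := by
        rw [List.getD_eq_getElem _ _ h']
        exact zeroIdx_nonneg ts _ (List.getElem_mem h')
      simp only [scanA, zeroIdx, hbe, Bool.false_eq_true, if_false]
      rw [if_neg (by omega), getD_map_add_one _ _ h', pySetD_cons_succ _ hx, ih s v h']

-- after the write, the free indices are exactly the old ones with the s-th removed
theorem zeroIdx_scanA : ∀ (team : List String) (s : Nat) (v : String),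
    s < (zeroIdx team).length → v ≠ "0" →
    zeroIdx (scanA team (s : Int) v) = (zeroIdx team).eraseIdx s := by
  intro team
  induction team with
  | nil => intro s v h _; simp [zeroIdx] at h
  | cons t ts ih =>
    intro s v h hv
    have hvb : (v == "0") = false := by simpa using hv
    by_cases ht : t = "0"
    · subst ht
      cases s with
      | zero =>
        simp only [scanA, zeroIdx, if_pos (beq_self_eq_true "0"), Nat.cast_zero]
        rw [if_pos (by norm_num)]
        simp [zeroIdx, hvb]
      | succ s' =>
        have h' : s' < (zeroIdx ts).length := by
          simp only [zeroIdx, if_pos (beq_self_eq_true "0"), List.length_cons,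
            List.length_map] at h
          omega
        have hc : ((s' + 1 : Nat) : Int) - 1 = (s' : Int) := by push_cast; ring
        simp only [scanA, zeroIdx, if_pos (beq_self_eq_true "0")]
        rw [hc, if_neg (by omega)]
        simp only [zeroIdx, if_pos (beq_self_eq_true "0"), List.eraseIdx_cons_succ]
        rw [ih s' v h' hv, map_eraseIdx_add_one]
    · have hbe : (t == "0") = false := by simpa using ht
      have h' : s < (zeroIdx ts).length := by
        simp only [zeroIdx, hbe, Bool.false_eq_true, if_false, List.length_map] at h
        exact h
      simp only [scanA, zeroIdx, hbe, Bool.false_eq_true, if_false]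
      rw [if_neg (by omega)]
      simp only [zeroIdx, hbe, Bool.false_eq_true, if_false]
      rw [ih s v h' hv, map_eraseIdx_add_one]

theorem pyRange_desc : PySem.List.pyRange 6 0 (-1) = desc 6 := by decide

theorem toStr_ne_zero (k : Nat) (hk : k ≤ 5) : PySem.Int.toStr (7 - ((k : Int) + 1)) ≠ "0" := by
  interval_cases k <;> decide

theorem foldl_eq (k : Nat) : ∀ (team : List String) (n : Int),
    k ≤ 6 → (zeroIdx team).length = k →
    (List.foldl stepA (team, n) (desc k)).1
      = ((List.foldl stepB ((team, zeroIdx team), n) (desc k)).1).1 := by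
  induction k with
  | zero => intro team n _ _; simp [desc]
  | succ k ih =>
    intro team n hk hlen
    have hipos : (0 : Int) < (k : Int) + 1 := by positivity
    have hsp0 : 0 ≤ PySem.Int.mod n ((k : Int) + 1) := PySem.Int.mod_nonneg n hipos
    have hsplt : PySem.Int.mod n ((k : Int) + 1) < (k : Int) + 1 := PySem.Int.mod_lt n hipos
    have hcast : PySem.Int.mod n ((k : Int) + 1)
        = (((PySem.Int.mod n ((k : Int) + 1)).toNat : Nat) : Int) := by omega
    have hsl : (PySem.Int.mod n ((k : Int) + 1)).toNat < (zeroIdx team).length := by omega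
    have hv : PySem.Int.toStr (7 - ((k : Int) + 1)) ≠ "0" := toStr_ne_zero k (by omega)
    have h67 : (6 : Int) - ((k : Int) + 1) + 1 = 7 - ((k : Int) + 1) := by ring
    have hA : stepA (team, n) ((k : Int) + 1)
        = (PySem.List.pySetD team
            ((zeroIdx team).getD (PySem.Int.mod n ((k : Int) + 1)).toNat 0)
            (PySem.Int.toStr (7 - ((k : Int) + 1))),
          PySem.Int.floordiv n ((k : Int) + 1)) := by
      simp only [stepA, h67]
      rw [hcast, scanA_eq_set team _ _ hsl, Int.toNat_natCast]
    have hpop : PySem.List.pop? (zeroIdx team) (PySem.Int.mod n ((k : Int) + 1))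
        = some ((zeroIdx team)[(PySem.Int.mod n ((k : Int) + 1)).toNat],
            (zeroIdx team).eraseIdx (PySem.Int.mod n ((k : Int) + 1)).toNat) := by
      conv_lhs => rw [hcast]
      exact PySem.List.pop?_natCast _ _ hsl
    have hB : stepB ((team, zeroIdx team), n) ((k : Int) + 1)
        = ((PySem.List.pySetD team ((zeroIdx team)[(PySem.Int.mod n ((k : Int) + 1)).toNat])
              (PySem.Int.toStr (7 - ((k : Int) + 1))),
            (zeroIdx team).eraseIdx (PySem.Int.mod n ((k : Int) + 1)).toNat),
          PySem.Int.floordiv n ((k : Int) + 1)) := by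
      simp only [stepB, hpop]
    have hgetd : (zeroIdx team).getD (PySem.Int.mod n ((k : Int) + 1)).toNat 0
        = (zeroIdx team)[(PySem.Int.mod n ((k : Int) + 1)).toNat] :=
      List.getD_eq_getElem _ _ hsl
    have hz : zeroIdx (PySem.List.pySetD team
          ((zeroIdx team)[(PySem.Int.mod n ((k : Int) + 1)).toNat])
          (PySem.Int.toStr (7 - ((k : Int) + 1))))
        = (zeroIdx team).eraseIdx (PySem.Int.mod n ((k : Int) + 1)).toNat := by
      rw [← hgetd, ← scanA_eq_set team _ _ hsl]
      exact zeroIdx_scanA team _ _ hsl hv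
    simp only [desc, List.foldl_cons]
    rw [hA, hB, hgetd, ← hz]
    refine ih _ _ (by omega) ?_
    rw [hz, List.length_eraseIdx_of_lt hsl, hlen]
    omega

theorem zeroIdx_init : zeroIdx ["0", "0", "0", "0", "0", "0"] = [0, 1, 2, 3, 4, 5] := by decide

theorem join_two (x y : String) : PySem.Str.join "," [x, y] = x ++ "," ++ y := by
  rw [← String.toList_inj]
  simp [PySem.Str.join, PySem.Chars.join, List.intercalate, String.toList_ofList]

-- ===== VERDICT (by name: the statement is the Claim_ definition above) =====
theorem denumAction_py_spec : Claim_equal_denumAction_py := by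
  intro n _
  unfold Spec_denumAction_py denumAction_py denumAction_py_alt
  by_cases h9 : PySem.Int.mod n 10 = 9
  · have hb9 : (PySem.Int.mod n 10 == 9) = true := by simpa using h9
    simp only [hb9, if_true]
    have hinit : (List.range 6).map (fun _ => "0") = ["0", "0", "0", "0", "0", "0"] := by decide
    rw [hinit, pyRange_desc]
    have heq := foldl_eq 6 ["0", "0", "0", "0", "0", "0"]
      (PySem.Int.floordiv (PySem.Int.floordiv n 10) 6) (le_refl 6) (by rw [zeroIdx_init]; rfl)
    rw [zeroIdx_init] at heq
    rw [heq]
    simp [PySem.List.slice_zero_start]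
  · have hb9 : (PySem.Int.mod n 10 == 9) = false := by simpa using h9
    simp only [hb9]
    have h0 : 0 ≤ PySem.Int.mod n 10 := PySem.Int.mod_nonneg n (by norm_num)
    have h10 : PySem.Int.mod n 10 < 10 := PySem.Int.mod_lt n (by norm_num)
    have ha0 : 0 ≤ PySem.Int.mod (PySem.Int.mod n 10) 3 := PySem.Int.mod_nonneg (PySem.Int.mod n 10) (by norm_num)
    have ha3 : PySem.Int.mod (PySem.Int.mod n 10) 3 < 3 := PySem.Int.mod_lt (PySem.Int.mod n 10) (by norm_num)
    have hfd : PySem.Int.floordiv (PySem.Int.mod n 10) 3 = PySem.Int.mod n 10 / 3 :=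
      PySem.Int.floordiv_eq_ediv_of_pos (by norm_num)
    have ha : PySem.Int.mod (PySem.Int.mod n 10) 3 = 0 ∨
        PySem.Int.mod (PySem.Int.mod n 10) 3 = 1 ∨
        PySem.Int.mod (PySem.Int.mod n 10) 3 = 2 := by omega
    have hb : PySem.Int.floordiv (PySem.Int.mod n 10) 3 = 0 ∨
        PySem.Int.floordiv (PySem.Int.mod n 10) 3 = 1 ∨
        PySem.Int.floordiv (PySem.Int.mod n 10) 3 = 2 := by
      rw [hfd]; omega
    rcases ha with h | h | h <;> rcases hb with g | g | g <;>
      simp only [h, g, List.foldl, stepActA, decodeAction] <;>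
      norm_num <;>
      rw [join_two] <;>
      rw [← String.toList_inj] <;>
      simp
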